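-- pv_equiv track=rewrite | github.com/eva-barczykowska/python_snippets | scramble_words.py | scramble_word
-- ===== SOURCE A (Python) =====
-- def scramble_word(word):
--     # Handle short words
--     if len(word) < 4:
--         return word
--
--     # Separate punctuation (assume one punctuation at most)
--     punct = ''
--     punct_index = -1
--     for i, char in enumerate(word):
--         if not char.isalnum():
--             punct = char
--             punct_index = i
--             word = word.replace(char, '')
--             break
--
--     # Scramble if still long enough
--     if len(word) < 4:
--         scrambled = word
--     else:
--         first, middle, last = word[0], sorted(word[1:-1]), word[-1]
--         scrambled = first + ''.join(middle) + last
--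
--     # Reinsert punctuation if any
--     if punct:
--         scrambled = scrambled[:punct_index] + punct + scrambled[punct_index:]
--
--     return scrambled
-- ===== SOURCE B (Python) =====
-- # B: counting sort over the fixed ASCII alphabet replaces the comparison sort of the middle
-- # letters (input domain is printable ASCII); punctuation handling via filter + list.insert.
-- def scramble_word(word):
--     if len(word) < 4:
--         return word
--     idx = next((i for i, c in enumerate(word) if not c.isalnum()), -1)
--     if idx >= 0:
--         punct = word[idx]
--         word = ''.join(c for c in word if c != punct)
--     if len(word) >= 4:
--         counts = [0] * 128
--         for c in word[1:-1]:
--             counts[ord(c)] += 1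
--         word = word[0] + ''.join(chr(k) * counts[k] for k in range(128)) + word[-1]
--     if idx >= 0:
--         chars = list(word)
--         chars.insert(idx, punct)
--         word = ''.join(chars)
--     return word
-- ===== Notes on version B (the rewrite author's own statement) =====
-- stated objective: alternative
-- what changed: The comparison sort of the word's middle letters is replaced by a counting sort over the fixed 128-slot ASCII alphabet (tally occurrences, then emit each code's repetitions in order), the single-char replace becomes a filter and the punctuation is reinserted with list.insert.
import Mathlib
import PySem

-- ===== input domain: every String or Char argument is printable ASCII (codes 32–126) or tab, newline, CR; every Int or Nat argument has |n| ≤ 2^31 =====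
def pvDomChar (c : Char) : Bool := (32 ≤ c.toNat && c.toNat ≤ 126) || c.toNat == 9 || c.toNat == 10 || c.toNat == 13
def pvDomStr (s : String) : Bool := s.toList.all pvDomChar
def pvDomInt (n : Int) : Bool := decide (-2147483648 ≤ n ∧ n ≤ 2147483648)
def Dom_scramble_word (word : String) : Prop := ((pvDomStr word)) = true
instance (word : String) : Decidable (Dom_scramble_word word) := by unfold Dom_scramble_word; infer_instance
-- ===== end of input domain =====

-- B replaces A's comparison sort of the middle letters by a counting sort over the fixed
-- 128-slot ASCII alphabet (objective: alternative algorithm, same measured cost).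

-- ===== PORT A =====
-- the `for i, char in enumerate(word): if not char.isalnum(): … break` loop
def pvFindPunct : Nat → List Char → Option (Nat × Char)
  | _, [] => none
  | i, c :: t => if !(PySem.Chars.isalnum c) then some (i, c) else pvFindPunct (i + 1) t

-- first + ''.join(sorted(word[1:-1])) + last  (word[0]/word[-1] cannot fail here: length ≥ 4)
def pvScrambleA (ws : List Char) : List Char :=
  ((PySem.List.pyGet? ws 0).getD ' ') ::
    (PySem.List.sorted (PySem.List.slice ws (some 1) (some (-1))) (fun x => x) false
      ++ [(PySem.List.pyGet? ws (-1)).getD ' '])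

def scramble_word (word : String) : String :=
  let cs := word.toList
  if cs.length < 4 then word
  else
    match pvFindPunct 0 cs with
    | none => String.ofList (if cs.length < 4 then cs else pvScrambleA cs)
    | some (i, p) =>
      let ws := PySem.Chars.replace cs [p] []
      let scrambled := if ws.length < 4 then ws else pvScrambleA ws
      String.ofList (PySem.List.slice scrambled none (some (i : Int)) ++ [p]
        ++ PySem.List.slice scrambled (some (i : Int)) none)

-- ===== PORT B =====
-- counts = [0]*128; for c in mid: counts[ord(c)] += 1
def pvCounts (mid : List Char) : List Nat :=
  mid.foldl (fun a c => a.set c.toNat (a.getD c.toNat 0 + 1)) (List.replicate 128 0)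

-- word[0] + ''.join(chr(k) * counts[k] for k in range(128)) + word[-1]
def pvCountScramble (ws : List Char) : List Char :=
  let counts := pvCounts ((ws.drop 1).dropLast)
  ((PySem.List.pyGet? ws 0).getD ' ') ::
    ((List.range 128).flatMap (fun k => List.replicate (counts.getD k 0) (Char.ofNat k))
      ++ [(PySem.List.pyGet? ws (-1)).getD ' '])

def scramble_word_alt (word : String) : String :=
  let cs := word.toList
  if cs.length < 4 then word
  else
    match cs.findIdx? (fun c => !(PySem.Chars.isalnum c)) with
    | none => String.ofList (if 4 ≤ cs.length then pvCountScramble cs else cs)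
    | some i =>
      let p := cs.getD i ' '
      let ws := cs.filter (fun c => c != p)
      let scrambled := if 4 ≤ ws.length then pvCountScramble ws else ws
      String.ofList (scrambled.insertIdx i p)

-- ===== PRECONDITION & SPEC =====
def Spec_scramble_word (word : String) (out : String) : Prop := out = scramble_word_alt word
instance (word : String) (out : String) : Decidable (Spec_scramble_word word out) := by unfold Spec_scramble_word; infer_instance

-- ===== CLAIM (what is proved, stated in full; the proofs are below) =====
def Claim_equal_scramble_word : Prop := ∀ (word : String), Dom_scramble_word word → Spec_scramble_word word (scramble_word word)

-- ===== LEMMAS AND PROOFS =====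

theorem pvCounts_fold (mid : List Char) : ∀ (a : List Nat), a.length = 128 →
    ∀ k, k < 128 → (∀ c ∈ mid, c.toNat < 128) →
    (mid.foldl (fun a c => a.set c.toNat (a.getD c.toNat 0 + 1)) a).getD k 0 =
      a.getD k 0 + mid.countP (fun c => c.toNat == k) := by
  induction mid with
  | nil => intro a _ k _ _; simp
  | cons c t ih =>
    intro a ha k hk hcod
    simp only [List.foldl_cons]
    rw [ih _ (by simp [ha]) k hk (fun x hx => hcod x (List.mem_cons_of_mem _ hx))]
    have hc : c.toNat < 128 := hcod c (List.mem_cons_self)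
    have hset : (a.set c.toNat (a.getD c.toNat 0 + 1)).getD k 0 =
        a.getD k 0 + (if c.toNat = k then 1 else 0) := by
      simp only [List.getD_eq_getElem?_getD, List.getElem?_set]
      split_ifs with h1 h2 <;> simp_all
    rw [hset, List.countP_cons]
    simp only [beq_iff_eq]
    split_ifs <;> omega

theorem pvCounts_getD (mid : List Char) (k : Nat) (hk : k < 128)
    (h : ∀ c ∈ mid, c.toNat < 128) :
    (pvCounts mid).getD k 0 = mid.countP (fun c => c.toNat == k) := by
  rw [pvCounts, pvCounts_fold mid _ (by simp) k hk h,
    List.getD_eq_getElem?_getD, List.getElem?_replicate]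
  simp [hk]
theorem pvToNat_ofNat {k : Nat} (hk : k < 128) : (Char.ofNat k).toNat = k := by
  rw [Char.toNat_ofNat, if_pos (Or.inl (by omega))]

theorem pvChar_le_iff (a b : Char) : a ≤ b ↔ a.toNat ≤ b.toNat := by
  rw [Char.le_def, UInt32.le_iff_toNat_le]; exact Iff.rfl

theorem pvOfNat_eq_iff {k : Nat} (hk : k < 128) (a : Char) : Char.ofNat k = a ↔ a.toNat = k := by
  constructor
  · intro h; rw [← h, pvToNat_ofNat hk]
  · intro h; rw [← h, Char.ofNat_toNat]

theorem pvFlat_count (N : Nat) (hN : N ≤ 128) (g : Nat → Nat) (a : Char) :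
    ((List.range N).flatMap (fun k => List.replicate (g k) (Char.ofNat k))).count a =
      if a.toNat < N then g a.toNat else 0 := by
  induction N with
  | zero => simp
  | succ n ih =>
    have hn : n < 128 := by omega
    rw [List.range_succ, List.flatMap_append, List.count_append, ih (by omega)]
    simp only [List.flatMap_cons, List.flatMap_nil, List.append_nil, List.count_replicate]
    by_cases h : a.toNat = n
    · simp [beq_iff_eq, pvOfNat_eq_iff hn, h]
    · by_cases h2 : a.toNat < n
      · simp [beq_iff_eq, pvOfNat_eq_iff hn, h, h2]
        intro hx; omega
      · simp [beq_iff_eq, pvOfNat_eq_iff hn, h, h2]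
        intro hx; omega

theorem pvFlat_pairwise (N : Nat) (hN : N ≤ 128) (g : Nat → Nat) :
    List.Pairwise (· ≤ ·) ((List.range N).flatMap (fun k => List.replicate (g k) (Char.ofNat k))) := by
  induction N with
  | zero => simp
  | succ n ih =>
    rw [List.range_succ, List.flatMap_append]
    rw [List.pairwise_append]
    refine ⟨ih (by omega), ?_, ?_⟩
    · simp only [List.flatMap_cons, List.flatMap_nil, List.append_nil]
      exact List.pairwise_replicate.mpr (Or.inr le_rfl)
    · intro x hx y hy
      simp only [List.flatMap_cons, List.flatMap_nil, List.append_nil] at hy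
      obtain ⟨k, hk, hxk⟩ := List.mem_flatMap.mp hx
      rw [List.mem_range] at hk
      rw [List.eq_of_mem_replicate hxk, List.eq_of_mem_replicate hy]
      rw [pvChar_le_iff, pvToNat_ofNat (by omega), pvToNat_ofNat (by omega)]
      omega

theorem pvChar_toNat_inj {a b : Char} (h : a.toNat = b.toNat) : a = b := by
  rw [← Char.ofNat_toNat a, h, Char.ofNat_toNat]

theorem pvFlat_eq_sorted (mid : List Char) (h : ∀ c ∈ mid, c.toNat < 128) :
    (List.range 128).flatMap (fun k => List.replicate ((pvCounts mid).getD k 0) (Char.ofNat k)) =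
      PySem.List.sorted mid (fun x => x) false := by
  symm
  apply PySem.List.sorted_id_eq_of_perm_of_pairwise
  · rw [List.perm_iff_count]
    intro a
    rw [pvFlat_count 128 le_rfl _ a]
    by_cases ha : a.toNat < 128
    · rw [if_pos ha, pvCounts_getD mid a.toNat ha h, List.count_eq_countP]
      apply List.countP_congr
      intro c hc
      simp only [beq_iff_eq]
      exact ⟨fun hh => pvChar_toNat_inj hh, fun hh => by rw [hh]⟩
    · rw [if_neg ha]
      symm
      rw [List.count_eq_zero]
      intro hmem
      exact ha (h a hmem)
  · exact pvFlat_pairwise 128 le_rfl _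

theorem pvSlice_one_neg_one (xs : List Char) :
    PySem.List.slice xs (some 1) (some (-1)) = (xs.drop 1).dropLast := by
  simp [PySem.List.slice, PySem.List.clampIdx]
  rcases xs with _ | ⟨a, t⟩
  · simp
  · simp [List.dropLast_eq_take]

theorem pvScramble_eq (ws : List Char) (h : ∀ c ∈ ws, c.toNat < 128) :
    pvScrambleA ws = pvCountScramble ws := by
  rw [pvScrambleA, pvCountScramble]
  have hmid : ∀ c ∈ (ws.drop 1).dropLast, c.toNat < 128 := by
    intro c hc
    exact h c (List.Sublist.mem (List.Sublist.mem hc (List.dropLast_sublist _)) (List.drop_sublist _ _))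
  rw [pvSlice_one_neg_one, ← pvFlat_eq_sorted _ hmid]

theorem pvIdx_le (cs : List Char) (i : Nat) (p : Char)
    (hf : cs.findIdx? (fun c => !(PySem.Chars.isalnum c)) = some i) (hp : p = cs.getD i ' ') :
    i ≤ (cs.filter (fun c => c != p)).length := by
  obtain ⟨hi, hpred, hbefore⟩ := List.findIdx?_eq_some_iff_getElem.mp hf
  have hpi : p = cs[i] := by
    rw [hp, List.getD_eq_getElem?_getD, List.getElem?_eq_getElem hi]
    rfl
  have halp : PySem.Chars.isalnum cs[i] = false := by simpa using hpred
  have htake : ∀ x ∈ cs.take i, (x != p) = true := by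
    intro x hx
    obtain ⟨j, hj, hxe⟩ := List.mem_iff_getElem.mp hx
    have hjlen : j < i := by
      rw [List.length_take] at hj
      omega
    have hal := hbefore j hjlen
    simp only [Bool.not_eq_true'] at hal  -- isalnum cs[j] = true... actually ¬(!isalnum cs[j]) = true
    subst hxe
    rw [List.getElem_take]
    simp only [bne_iff_ne, ne_eq]
    intro hcontra
    rw [hpi] at hcontra
    rw [hcontra, halp] at hal
    simp at hal
  have hcount : i ≤ List.countP (fun c => c != p) cs := by
    conv_rhs => rw [← List.take_append_drop i cs]
    rw [List.countP_append, List.countP_eq_length.mpr htake, List.length_take]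
    omega
  rw [← List.countP_eq_length_filter]
  exact hcount

theorem pvReplace_go (p : Char) : ∀ (fuel : Nat) (l acc : List Char), l.length ≤ fuel →
    PySem.Chars.replace.go [p] [] fuel l acc = acc.reverse ++ l.filter (fun c => c != p) := by
  intro fuel
  induction fuel with
  | zero => intro l acc h; simp at h; simp [h, PySem.Chars.replace.go]
  | succ n ih =>
    intro l acc h
    cases l with
    | nil => simp [PySem.Chars.replace.go]
    | cons c t =>
      rw [PySem.Chars.replace.go]
      by_cases hc : p = c
      · subst hc
        simp [List.isPrefixOf, ih t acc (by simpa using h)]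
      · simp [List.isPrefixOf, hc, ih t (c :: acc) (by simpa using h)]
        simp [Ne.symm hc]

theorem pvReplace_filter (cs : List Char) (p : Char) :
    PySem.Chars.replace cs [p] [] = cs.filter (fun c => c != p) := by
  rw [PySem.Chars.replace]
  simp [pvReplace_go p cs.length cs [] (le_refl _)]

-- A's enumerate loop is B's findIdx?
theorem pvFindPunct_eq (cs : List Char) (i : Nat) :
    pvFindPunct i cs =
      (cs.findIdx? (fun c => !(PySem.Chars.isalnum c))).map (fun j => (i + j, cs.getD j ' ')) := by
  induction cs generalizing i with
  | nil => simp [pvFindPunct]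
  | cons c t ih =>
    simp only [pvFindPunct, List.findIdx?_cons]
    by_cases h : PySem.Chars.isalnum c
    · simp only [h]
      rw [ih (i + 1)]
      cases hf : t.findIdx? (fun c => !(PySem.Chars.isalnum c)) with
      | none => simp
      | some j => simp [Nat.add_assoc, Nat.add_comm 1 j]
    · simp [h]

theorem pvInsertIdx_eq (l : List Char) (i : Nat) (p : Char) (h : i ≤ l.length) :
    l.insertIdx i p = l.take i ++ p :: l.drop i := by
  induction i generalizing l with
  | zero => simp
  | succ n ih =>
    cases l with
    | nil => simp at h
    | cons a t => simp [List.insertIdx_succ_cons, ih t (by simpa using h)]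

theorem pvScrambleA_length (ws : List Char) (h : 2 ≤ ws.length) :
    (pvScrambleA ws).length = ws.length := by
  simp [pvScrambleA, pvSlice_one_neg_one, PySem.List.length_sorted]
  omega

-- ===== VERDICT (by name: the statement is the Claim_ definition above) =====
theorem scramble_word_spec : Claim_equal_scramble_word := by
  intro word hdom
  unfold Spec_scramble_word
  have hcod : ∀ c ∈ word.toList, c.toNat < 128 := by
    intro c hc
    have h1 := List.all_eq_true.mp hdom c hc
    simp only [pvDomChar, Bool.or_eq_true, Bool.and_eq_true, decide_eq_true_eq, beq_iff_eq] at h1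
    omega
  rw [scramble_word, scramble_word_alt]
  simp only []
  by_cases hlen : word.toList.length < 4
  · rw [if_pos hlen, if_pos hlen]
  · simp only [if_neg hlen]
    rw [pvFindPunct_eq word.toList 0]
    cases hf : word.toList.findIdx? (fun c => !(PySem.Chars.isalnum c)) with
    | none =>
      simp only [Option.map_none]
      rw [if_pos (by omega : 4 ≤ word.toList.length), pvScramble_eq _ hcod]
    | some j =>
      simp only [Option.map_some, Nat.zero_add]
      have hws : ∀ c ∈ word.toList.filter (fun c => c != word.toList.getD j ' '), c.toNat < 128 :=
        fun c hc => hcod c (List.mem_of_mem_filter hc)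
      have hle : j ≤ (word.toList.filter (fun c => c != word.toList.getD j ' ')).length :=
        pvIdx_le _ _ _ hf rfl
      rw [pvReplace_filter]
      have hscr : (if (word.toList.filter (fun c => c != word.toList.getD j ' ')).length < 4
            then word.toList.filter (fun c => c != word.toList.getD j ' ')
            else pvScrambleA (word.toList.filter (fun c => c != word.toList.getD j ' ')))
          = (if 4 ≤ (word.toList.filter (fun c => c != word.toList.getD j ' ')).length
            then pvCountScramble (word.toList.filter (fun c => c != word.toList.getD j ' '))
            else word.toList.filter (fun c => c != word.toList.getD j ' ')) := by
        split_ifs with h1 h2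
        · omega
        · rfl
        · exact pvScramble_eq _ hws
        · omega
      rw [hscr]
      have hlescr : j ≤ (if 4 ≤ (word.toList.filter (fun c => c != word.toList.getD j ' ')).length
            then pvCountScramble (word.toList.filter (fun c => c != word.toList.getD j ' '))
            else word.toList.filter (fun c => c != word.toList.getD j ' ')).length := by
        split_ifs with h1
        · rw [← pvScramble_eq _ hws, pvScrambleA_length _ (by omega)]
          exact hle
        · exact hle
      rw [PySem.List.slice_to _ (by omega : (0:Int) ≤ (j:Int)),
        PySem.List.slice_from _ (by omega : (0:Int) ≤ (j:Int)),
        Int.toNat_natCast, pvInsertIdx_eq _ j _ hlescr]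
      simp
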